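-- pv_equiv track=rewrite | github.com/yasufumi-nakata/Pytra | tools/gen/export_backend_test_matrix.py | _extract_detail
-- ===== SOURCE A (Python) =====
-- def _extract_detail(output: str) -> str:
--     lines = [line.strip() for line in output.splitlines() if line.strip()]
--     for prefix in (
--         "RuntimeError:",
--         "AssertionError:",
--         "TypeError:",
--         "ValueError:",
--         "ImportError:",
--         "ModuleNotFoundError:",
--         "FileNotFoundError:",
--         "AttributeError:",
--         "KeyError:",
--         "IndexError:",
--     ):
--         for line in lines:
--             if line.startswith(prefix):
--                 return line
--     for line in lines:
--         if line.startswith(("ERROR:", "FAIL:")):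
--             return line
--     for line in output.splitlines():
--         stripped = line.strip()
--         if not stripped:
--             continue
--         if all(ch in ".FEsx" for ch in stripped):
--             continue
--         if stripped.startswith(("=", "-", "Traceback", "Ran ", "OK", "FAILED ")):
--             continue
--         return stripped
--     return "no detail"
-- ===== SOURCE B (Python) =====
-- _PREFIXES = (
--     "RuntimeError:",
--     "AssertionError:",
--     "TypeError:",
--     "ValueError:",
--     "ImportError:",
--     "ModuleNotFoundError:",
--     "FileNotFoundError:",
--     "AttributeError:",
--     "KeyError:",
--     "IndexError:",
--     "ERROR:",
--     "FAIL:",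
-- )
--
--
-- def _extract_detail(output: str) -> str:
--     # One pass over the stripped non-empty lines keeping the best (lowest-rank)
--     # matching line; ERROR:/FAIL: share rank 10, below the ten named errors.
--     lines = [line.strip() for line in output.splitlines() if line.strip()]
--     best_rank = 12
--     best_line = None
--     for line in lines:
--         r = next((min(i, 10) for i, p in enumerate(_PREFIXES) if line.startswith(p)), 12)
--         if r < best_rank:
--             best_rank, best_line = r, line
--     if best_line is not None:
--         return best_line
--     return next(
--         (s for s in (line.strip() for line in output.splitlines())
--          if s and not all(ch in ".FEsx" for ch in s)
--          and not s.startswith(("=", "-", "Traceback", "Ran ", "OK", "FAILED "))),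
--         "no detail",
--     )
-- ===== Notes on version B (the rewrite author's own statement) =====
-- stated objective: simpler
-- what changed: A scans the whole line list once per error prefix (ten sequential passes plus an ERROR:/FAIL: pass); B makes a single pass over the lines keeping the lowest-ranked matching line (named errors rank 0-9, ERROR:/FAIL: rank 10, strict-improvement update preserves the earliest line per rank), with the same final fallback scan.
import Mathlib
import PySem

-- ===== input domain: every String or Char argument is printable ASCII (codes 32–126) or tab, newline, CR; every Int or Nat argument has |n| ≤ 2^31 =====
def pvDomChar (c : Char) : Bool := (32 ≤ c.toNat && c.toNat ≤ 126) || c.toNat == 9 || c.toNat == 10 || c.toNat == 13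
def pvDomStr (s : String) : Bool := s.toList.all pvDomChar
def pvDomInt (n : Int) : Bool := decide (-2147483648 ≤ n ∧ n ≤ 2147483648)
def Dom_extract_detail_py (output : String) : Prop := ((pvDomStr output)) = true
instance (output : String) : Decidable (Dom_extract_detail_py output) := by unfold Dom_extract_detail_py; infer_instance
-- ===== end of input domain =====

-- B replaces A's ten sequential scans of the line list (one per error prefix) by a single
-- pass that keeps the lowest-ranked matching line (objective: simpler one-pass decomposition).

-- ===== PORT A =====
def pvPrefixesA : List String :=
  ["RuntimeError:", "AssertionError:", "TypeError:", "ValueError:", "ImportError:",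
   "ModuleNotFoundError:", "FileNotFoundError:", "AttributeError:", "KeyError:", "IndexError:"]

def extract_detail_py (output : String) : String :=
  let lines := ((PySem.Str.splitlines output).filter
      (fun l => PySem.Str.strip l ≠ "")).map PySem.Str.strip
  match pvPrefixesA.findSome? (fun p => lines.find? (fun l => PySem.Str.startswith l p)) with
  | some l => l
  | none =>
    match lines.find? (fun l =>
        PySem.Str.startswith l "ERROR:" || PySem.Str.startswith l "FAIL:") with
    | some l => l
    | none =>
      match (PySem.Str.splitlines output).findSome? (fun line =>
          let s := PySem.Str.strip line
          if s = "" then none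
          -- `ch in ".FEsx"` on a one-character string = character membership
          else if s.toList.all (fun ch => ".FEsx".toList.contains ch) then none
          else if PySem.Str.startswith s "=" || PySem.Str.startswith s "-" ||
                  PySem.Str.startswith s "Traceback" || PySem.Str.startswith s "Ran " ||
                  PySem.Str.startswith s "OK" || PySem.Str.startswith s "FAILED " then none
          else some s) with
      | some s => s
      | none => "no detail"

-- ===== PORT B =====
def pvPrefixesB : List String :=
  ["RuntimeError:", "AssertionError:", "TypeError:", "ValueError:", "ImportError:",
   "ModuleNotFoundError:", "FileNotFoundError:", "AttributeError:", "KeyError:", "IndexError:",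
   "ERROR:", "FAIL:"]

-- r = next((min(i, 10) for i, p in enumerate(_PREFIXES) if line.startswith(p)), 12)
def pvRank (line : String) : Nat :=
  (pvPrefixesB.zipIdx.findSome? (fun pi =>
    if PySem.Str.startswith line pi.1 then some (min pi.2 10) else none)).getD 12

def extract_detail_py_alt (output : String) : String :=
  let lines := ((PySem.Str.splitlines output).filter
      (fun l => PySem.Str.strip l ≠ "")).map PySem.Str.strip
  let best := lines.foldl (fun (b : Nat × Option String) line =>
      let r := pvRank line
      if r < b.1 then (r, some line) else b) (12, none)
  match best.2 with
  | some l => l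
  | none =>
    (((PySem.Str.splitlines output).map PySem.Str.strip).find? (fun s =>
        s ≠ "" &&
        !(s.toList.all (fun ch => ".FEsx".toList.contains ch)) &&
        !(PySem.Str.startswith s "=" || PySem.Str.startswith s "-" ||
          PySem.Str.startswith s "Traceback" || PySem.Str.startswith s "Ran " ||
          PySem.Str.startswith s "OK" || PySem.Str.startswith s "FAILED "))).getD "no detail"

-- ===== PRECONDITION & SPEC =====
def Spec_extract_detail_py (output : String) (out : String) : Prop := out = extract_detail_py_alt output
instance (output : String) (out : String) : Decidable (Spec_extract_detail_py output out) := by unfold Spec_extract_detail_py; infer_instance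

-- ===== CLAIM (what is proved, stated in full; the proofs are below) =====
def Claim_equal_extract_detail_py : Prop := ∀ (output : String), Dom_extract_detail_py output → Spec_extract_detail_py output (extract_detail_py output)

-- ===== LEMMAS AND PROOFS =====
lemma starts_uniq (l p q : String) (hp : PySem.Str.startswith l p = true) (hq : PySem.Str.startswith l q = true) :
    p.toList <+: q.toList ∨ q.toList <+: p.toList := by
  simp only [PySem.Str.startswith_eq] at hp hq
  rw [PySem.Chars.startswith_iff] at hp hq
  exact List.prefix_or_prefix_of_prefix hp hq

lemma pvB_uniq (l : String) (i j : Nat) (hi : i < 12) (hj : j < 12)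
    (hpi : PySem.Str.startswith l (pvPrefixesB[i]'(by simp [pvPrefixesB]; omega)) = true)
    (hpj : PySem.Str.startswith l (pvPrefixesB[j]'(by simp [pvPrefixesB]; omega)) = true) : i = j := by
  by_contra hne
  have h := starts_uniq l _ _ hpi hpj
  interval_cases i <;> interval_cases j <;> simp_all [pvPrefixesB]

lemma rank_eq (l : String) :
    pvRank l = ((pvPrefixesB.findIdx? (fun p => PySem.Str.startswith l p)).map (fun j => min j 10)).getD 12 := by
  have gen : ∀ (ps : List String) (n : Nat),
      (ps.zipIdx n).findSome? (fun pi => if PySem.Str.startswith l pi.1 then some (min pi.2 10) else none)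
      = (ps.findIdx? (fun p => PySem.Str.startswith l p)).map (fun j => min (n + j) 10) := by
    intro ps
    induction ps with
    | nil => intro n; rfl
    | cons p ps ih =>
      intro n
      rw [List.zipIdx_cons, List.findSome?_cons, List.findIdx?_cons]
      simp only [PySem.Str.startswith_eq]
      by_cases h : PySem.Chars.startswith l.toList p.toList = true
      · simp [h]
      · simp only [h, Bool.false_eq_true, if_false]
        have := ih (n+1)
        simp only [PySem.Str.startswith_eq] at this
        rw [this, Option.map_map]
        congr 1
        funext j
        simp [Nat.add_assoc, Nat.add_comm 1 j]
  unfold pvRank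
  rw [show pvPrefixesB.zipIdx = pvPrefixesB.zipIdx 0 from rfl, gen]
  simp

lemma rank_of_starts (l : String) (i : Nat) (hi : i < 12)
    (h : PySem.Str.startswith l (pvPrefixesB[i]'(by simp [pvPrefixesB]; omega)) = true) :
    pvRank l = min i 10 := by
  rw [rank_eq]
  rcases hf : pvPrefixesB.findIdx? (fun p => PySem.Str.startswith l p) with _ | j
  · rw [List.findIdx?_eq_none_iff] at hf
    have hfi := hf (pvPrefixesB[i]'(by simp [pvPrefixesB]; omega)) (List.getElem_mem _)
    simp only [PySem.Str.startswith_eq] at hfi h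
    rw [hfi] at h
    simp at h
  · obtain ⟨hj, hpj, -⟩ := List.findIdx?_eq_some_iff_getElem.mp hf
    have hj12 : j < 12 := by simpa [pvPrefixesB] using hj
    have := pvB_uniq l i j hi hj12 h hpj
    subst this
    rfl

lemma rank_cases (l : String) :
    pvRank l = 12 ∨ ∃ i, ∃ hi : i < 12, pvRank l = min i 10 ∧
      PySem.Str.startswith l (pvPrefixesB[i]'(by simp [pvPrefixesB]; omega)) = true := by
  rw [rank_eq]
  rcases hf : pvPrefixesB.findIdx? (fun p => PySem.Str.startswith l p) with _ | j
  · left; rfl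
  · obtain ⟨hj, hpj, -⟩ := List.findIdx?_eq_some_iff_getElem.mp hf
    have hj12 : j < 12 := by simpa [pvPrefixesB] using hj
    exact Or.inr ⟨j, hj12, rfl, hpj⟩

lemma rank_le12 (l : String) : pvRank l ≤ 12 := by
  rcases rank_cases l with h | ⟨i, hi, h, -⟩ <;> omega

lemma rank_ne11 (l : String) : pvRank l ≠ 11 := by
  rcases rank_cases l with h | ⟨i, hi, h, -⟩ <;> omega

lemma starts_iff_rank (l : String) (i : Nat) (hi : i ≤ 9) :
    PySem.Str.startswith l (pvPrefixesB[i]'(by simp [pvPrefixesB]; omega)) = (pvRank l == i) := by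
  by_cases h : PySem.Str.startswith l (pvPrefixesB[i]'(by simp [pvPrefixesB]; omega)) = true
  · rw [h, rank_of_starts l i (by omega) h]
    have : min i 10 = i := by omega
    simp [this]
  · have hne : pvRank l ≠ i := by
      rcases rank_cases l with hr | ⟨j, hj, hr, hs⟩
      · omega
      · intro hri
        have hmin : min j 10 = i := by rw [← hr, hri]
        have hj' : j = i := by omega
        subst hj'
        exact h hs
    rw [Bool.not_eq_true] at h
    rw [h]
    simp [hne]

lemma rank10_iff (l : String) :
    (PySem.Str.startswith l "ERROR:" || PySem.Str.startswith l "FAIL:") = (pvRank l == 10) := by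
  by_cases h10 : PySem.Str.startswith l "ERROR:" = true
  · have hr : pvRank l = 10 := by
      simpa using rank_of_starts l 10 (by omega) (by simpa [pvPrefixesB] using h10)
    rw [h10, hr]
    simp
  · by_cases h11 : PySem.Str.startswith l "FAIL:" = true
    · have hr : pvRank l = 10 := by
        simpa using rank_of_starts l 11 (by omega) (by simpa [pvPrefixesB] using h11)
      rw [h11, hr]
      simp
    · rw [Bool.not_eq_true] at h10 h11
      have hne : pvRank l ≠ 10 := by
        rcases rank_cases l with hr | ⟨j, hj, hr, hs⟩
        · omega
        · intro hri
          rw [hr] at hri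
          have : j = 10 ∨ j = 11 := by omega
          rcases this with rfl | rfl
          · rw [show pvPrefixesB[10] = "ERROR:" from rfl, h10] at hs; simp at hs
          · rw [show pvPrefixesB[11] = "FAIL:" from rfl, h11] at hs; simp at hs
      rw [h10, h11]
      simp [hne]

def pvMinr (ls : List String) : Nat := ls.foldr (fun l a => min (pvRank l) a) 12

lemma pvMinr_le12 (ls : List String) : pvMinr ls ≤ 12 := by
  induction ls with
  | nil => simp [pvMinr]
  | cons a ls ih => simp only [pvMinr, List.foldr_cons] at *; omega

lemma pvMinr_le (ls : List String) (l : String) (hl : l ∈ ls) : pvMinr ls ≤ pvRank l := by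
  induction ls with
  | nil => simp at hl
  | cons a ls ih =>
    rcases List.mem_cons.mp hl with rfl | hl
    · simp only [pvMinr, List.foldr_cons]; omega
    · have := ih hl; simp only [pvMinr, List.foldr_cons] at *; omega

lemma pvMinr_attained (ls : List String) (h : pvMinr ls ≠ 12) :
    ∃ l ∈ ls, pvRank l = pvMinr ls := by
  induction ls with
  | nil => simp [pvMinr] at h
  | cons a ls ih =>
    simp only [pvMinr, List.foldr_cons] at h ⊢
    by_cases hle : pvRank a ≤ pvMinr ls
    · exact ⟨a, List.mem_cons_self, by change pvRank a = min _ (pvMinr ls); omega⟩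
    · have hne : pvMinr ls ≠ 12 := by have := rank_le12 a; omega
      obtain ⟨l, hl, hr⟩ := ih hne
      exact ⟨l, List.mem_cons_of_mem _ hl, by change pvRank l = min _ (pvMinr ls); omega⟩

lemma pvMinr_ne11 (ls : List String) : pvMinr ls ≠ 11 := by
  intro h
  obtain ⟨l, -, hr⟩ := pvMinr_attained ls (by omega)
  exact rank_ne11 l (by omega)

lemma find?_congr_mem {α : Type} (xs : List α) (p q : α → Bool) (h : ∀ x ∈ xs, p x = q x) :
    xs.find? p = xs.find? q := by
  induction xs with
  | nil => rfl
  | cons a xs ih =>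
    rw [List.find?_cons, List.find?_cons, h a List.mem_cons_self,
        ih (fun x hx => h x (List.mem_cons_of_mem _ hx))]

lemma findR_none (ls : List String) (i : Nat) (h : i < pvMinr ls) :
    ls.find? (fun l => pvRank l == i) = none := by
  rw [List.find?_eq_none]
  intro l hl
  have := pvMinr_le ls l hl
  simp only [beq_iff_eq]
  omega

lemma foldB (ls : List String) : ∀ (r₀ : Nat) (b₀ : Option String), r₀ ≤ 12 →
    ls.foldl (fun (b : Nat × Option String) line =>
      let r := pvRank line
      if r < b.1 then (r, some line) else b) (r₀, b₀)
    = if pvMinr ls < r₀ then (pvMinr ls, ls.find? (fun l => pvRank l == pvMinr ls)) else (r₀, b₀) := by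
  induction ls with
  | nil =>
    intro r₀ b₀ h
    simp only [List.foldl_nil, pvMinr, List.foldr_nil]
    rw [if_neg (by omega)]
  | cons a ls ih =>
    intro r₀ b₀ h
    have hm : pvMinr (a :: ls) = min (pvRank a) (pvMinr ls) := rfl
    rw [List.foldl_cons]
    simp only []
    by_cases ha : pvRank a < r₀
    · rw [if_pos ha, ih (pvRank a) (some a) (rank_le12 a)]
      by_cases hls : pvMinr ls < pvRank a
      · rw [if_pos hls, if_pos (by omega), hm,
            show (min (pvRank a) (pvMinr ls)) = pvMinr ls from by omega, List.find?_cons,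
            show (pvRank a == pvMinr ls) = false from by simp only [beq_eq_false_iff_ne]; omega]
      · rw [if_neg hls, if_pos (by omega), hm,
            show (min (pvRank a) (pvMinr ls)) = pvRank a from by omega, List.find?_cons,
            show (pvRank a == pvRank a) = true from by simp]
    · rw [if_neg ha, ih r₀ b₀ h]
      by_cases hls : pvMinr ls < r₀
      · rw [if_pos hls, if_pos (by rw [hm]; omega), hm,
            show (min (pvRank a) (pvMinr ls)) = pvMinr ls from by omega, List.find?_cons,
            show (pvRank a == pvMinr ls) = false from by simp only [beq_eq_false_iff_ne]; omega]
      · rw [if_neg hls, if_neg (by rw [hm]; omega)]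

lemma phase3_eq (xs : List String) (g h : String → Bool) :
    (xs.findSome? (fun line =>
      let s := PySem.Str.strip line
      if s = "" then none else if g s then none else if h s then none else some s))
    = (xs.map PySem.Str.strip).find? (fun s => s ≠ "" && !g s && !h s) := by
  induction xs with
  | nil => rfl
  | cons a xs ih =>
    by_cases h1 : PySem.Str.strip a = ""
    · simp only [List.findSome?_cons, List.map_cons, List.find?_cons]
      simp only [if_pos h1]
      rw [show (decide (PySem.Str.strip a ≠ "") && !g (PySem.Str.strip a) && !h (PySem.Str.strip a)) = false
          from by simp [h1]]
      exact ih
    · by_cases h2 : g (PySem.Str.strip a) = true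
      · simp only [List.findSome?_cons, List.map_cons, List.find?_cons]
        simp only [if_neg h1, if_pos h2]
        rw [show (decide (PySem.Str.strip a ≠ "") && !g (PySem.Str.strip a) && !h (PySem.Str.strip a)) = false
            from by simp [h2]]
        exact ih
      · by_cases h3 : h (PySem.Str.strip a) = true
        · simp only [List.findSome?_cons, List.map_cons, List.find?_cons]
          simp only [if_neg h1, if_neg h2, if_pos h3]
          rw [show (decide (PySem.Str.strip a ≠ "") && !g (PySem.Str.strip a) && !h (PySem.Str.strip a)) = false
              from by simp [h3]]
          exact ih
        · simp only [List.findSome?_cons, List.map_cons, List.find?_cons]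
          simp only [if_neg h1, if_neg h2, if_neg h3]
          rw [show (decide (PySem.Str.strip a ≠ "") && !g (PySem.Str.strip a) && !h (PySem.Str.strip a)) = true
              from by simp [h1, h2, h3]]

-- ===== VERDICT (by name: the statement is the Claim_ definition above) =====
theorem extract_detail_py_spec : Claim_equal_extract_detail_py := by
  intro output _
  unfold Spec_extract_detail_py
  simp only [extract_detail_py, extract_detail_py_alt]
  set lines := ((PySem.Str.splitlines output).filter (fun l => PySem.Str.strip l ≠ "")).map PySem.Str.strip with hlines
  rw [foldB lines 12 none (by omega)]
  have e : ∀ (i : Nat) (hi : i ≤ 9),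
      lines.find? (fun l => PySem.Str.startswith l (pvPrefixesB[i]'(by simp [pvPrefixesB]; omega)))
      = lines.find? (fun l => pvRank l == i) :=
    fun i hi => find?_congr_mem _ _ _ (fun l _ => starts_iff_rank l i hi)
  have e0 : lines.find? (fun l => PySem.Str.startswith l "RuntimeError:") = lines.find? (fun l => pvRank l == 0) := e 0 (by omega)
  have e1 : lines.find? (fun l => PySem.Str.startswith l "AssertionError:") = lines.find? (fun l => pvRank l == 1) := e 1 (by omega)
  have e2 : lines.find? (fun l => PySem.Str.startswith l "TypeError:") = lines.find? (fun l => pvRank l == 2) := e 2 (by omega)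
  have e3 : lines.find? (fun l => PySem.Str.startswith l "ValueError:") = lines.find? (fun l => pvRank l == 3) := e 3 (by omega)
  have e4 : lines.find? (fun l => PySem.Str.startswith l "ImportError:") = lines.find? (fun l => pvRank l == 4) := e 4 (by omega)
  have e5 : lines.find? (fun l => PySem.Str.startswith l "ModuleNotFoundError:") = lines.find? (fun l => pvRank l == 5) := e 5 (by omega)
  have e6 : lines.find? (fun l => PySem.Str.startswith l "FileNotFoundError:") = lines.find? (fun l => pvRank l == 6) := e 6 (by omega)
  have e7 : lines.find? (fun l => PySem.Str.startswith l "AttributeError:") = lines.find? (fun l => pvRank l == 7) := e 7 (by omega)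
  have e8 : lines.find? (fun l => PySem.Str.startswith l "KeyError:") = lines.find? (fun l => pvRank l == 8) := e 8 (by omega)
  have e9 : lines.find? (fun l => PySem.Str.startswith l "IndexError:") = lines.find? (fun l => pvRank l == 9) := e 9 (by omega)
  have e10 : lines.find? (fun l => PySem.Str.startswith l "ERROR:" || PySem.Str.startswith l "FAIL:")
      = lines.find? (fun l => pvRank l == 10) := find?_congr_mem _ _ _ (fun l _ => rank10_iff l)
  simp only [pvPrefixesA, List.findSome?_cons, List.findSome?_nil]
  rw [e0, e1, e2, e3, e4, e5, e6, e7, e8, e9, e10]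
  have h11 := pvMinr_ne11 lines
  have h12 := pvMinr_le12 lines
  by_cases hm : pvMinr lines < 12
  · rw [if_pos hm]
    obtain ⟨x, hx⟩ : ∃ x, lines.find? (fun l => pvRank l == pvMinr lines) = some x := by
      rw [← Option.isSome_iff_exists, List.find?_isSome]
      obtain ⟨l, hl, hr⟩ := pvMinr_attained lines (by omega)
      exact ⟨l, hl, by simp [hr]⟩
    obtain ⟨k, hk, hkle⟩ : ∃ k, pvMinr lines = k ∧ k ≤ 10 := ⟨_, rfl, by omega⟩
    rw [hk] at hx ⊢
    interval_cases k <;>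
      (try rw [findR_none lines 0 (by omega)]) <;>
      (try rw [findR_none lines 1 (by omega)]) <;>
      (try rw [findR_none lines 2 (by omega)]) <;>
      (try rw [findR_none lines 3 (by omega)]) <;>
      (try rw [findR_none lines 4 (by omega)]) <;>
      (try rw [findR_none lines 5 (by omega)]) <;>
      (try rw [findR_none lines 6 (by omega)]) <;>
      (try rw [findR_none lines 7 (by omega)]) <;>
      (try rw [findR_none lines 8 (by omega)]) <;>
      (try rw [findR_none lines 9 (by omega)]) <;>
      rw [hx]
  · rw [if_neg hm]
    rw [findR_none lines 0 (by omega), findR_none lines 1 (by omega), findR_none lines 2 (by omega),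
        findR_none lines 3 (by omega), findR_none lines 4 (by omega), findR_none lines 5 (by omega),
        findR_none lines 6 (by omega), findR_none lines 7 (by omega), findR_none lines 8 (by omega),
        findR_none lines 9 (by omega), findR_none lines 10 (by omega)]
    rw [phase3_eq (PySem.Str.splitlines output)
        (fun s => s.toList.all (fun ch => ".FEsx".toList.contains ch))
        (fun s => PySem.Str.startswith s "=" || PySem.Str.startswith s "-" ||
          PySem.Str.startswith s "Traceback" || PySem.Str.startswith s "Ran " ||
          PySem.Str.startswith s "OK" || PySem.Str.startswith s "FAILED ")]
    rcases hfind : List.find?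
        (fun s => (decide (s ≠ "") && !(s.toList.all fun ch => ".FEsx".toList.contains ch)) &&
          !(PySem.Str.startswith s "=" || PySem.Str.startswith s "-" || PySem.Str.startswith s "Traceback" ||
            PySem.Str.startswith s "Ran " || PySem.Str.startswith s "OK" || PySem.Str.startswith s "FAILED "))
        (List.map PySem.Str.strip (PySem.Str.splitlines output)) with _ | v <;> rfl
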